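-- pv_equiv track=rewrite | github.com/StanfordAI4HI/ICLR2019_prism | utils.py | relabel_clustering
-- ===== SOURCE A (Python) =====
-- def relabel_clustering(temporal_clustering):
--     relabeled = []
--     last_item = temporal_clustering[0]
--     counter = 0
--     for item in temporal_clustering:
--         if item != last_item:
--             counter += 1
--         relabeled.append(counter)
--         last_item = item
--     return relabeled
-- ===== SOURCE B (Python) =====
-- def relabel_clustering(temporal_clustering):
--     out = []
--     i, label, n = 0, 0, len(temporal_clustering)
--     while i < n:
--         j = i
--         while j < n and temporal_clustering[j] == temporal_clustering[i]:
--             j += 1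
--         out.extend([label] * (j - i))
--         label += 1
--         i = j
--     return out
-- ===== Notes on version B (the rewrite author's own statement) =====
-- stated objective: alternative
-- what changed: B splits the list into maximal runs of equal values (a two-level index scan, groupby-style) and emits each run's incrementing label via list replication, instead of A's single pass carrying last_item/counter state per element.
-- outside the precondition, e.g. on relabel_clustering([]): A raises IndexError, B returns []
-- crash fix: On the empty list A raises IndexError (temporal_clustering[0]); B returns []. — e.g. on relabel_clustering([]): A raises IndexError, B returns []
import Mathlib
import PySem

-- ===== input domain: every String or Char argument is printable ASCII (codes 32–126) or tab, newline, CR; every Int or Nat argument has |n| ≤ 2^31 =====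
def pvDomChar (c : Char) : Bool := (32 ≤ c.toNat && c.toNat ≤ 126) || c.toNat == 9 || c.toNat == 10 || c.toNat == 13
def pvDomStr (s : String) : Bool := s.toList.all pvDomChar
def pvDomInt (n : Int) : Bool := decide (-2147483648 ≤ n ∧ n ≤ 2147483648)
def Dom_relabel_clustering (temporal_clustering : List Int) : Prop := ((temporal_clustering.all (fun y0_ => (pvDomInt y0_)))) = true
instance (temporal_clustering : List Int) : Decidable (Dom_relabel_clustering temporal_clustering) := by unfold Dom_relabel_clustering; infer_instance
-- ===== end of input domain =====

-- B relabels by maximal runs (groupby-style run scan + replication) instead of A's per-element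
-- last_item/counter pass; same values on every non-empty input, and B returns [] where A raises.


-- ===== PORT A =====
-- Loop 'for item in temporal_clustering' with state (last_item, counter), consing each label.
def pvALoop (last counter : Int) : List Int → List Int
  | [] => []
  | item :: rest =>
    let c := if item ≠ last then counter + 1 else counter
    c :: pvALoop item c rest

-- temporal_clustering[0] raises on []; that input is excluded by Pre_ below.
def relabel_clustering (temporal_clustering : List Int) : List Int :=
  match temporal_clustering with
  | [] => []
  | h :: _ => pvALoop h 0 temporal_clustering

-- ===== PORT B =====
-- Inner while loop: the run of elements equal to the head; outer loop advances past it.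
def pvRuns : List Int → List (List Int)
  | [] => []
  | x :: xs => (x :: xs.takeWhile (· == x)) :: pvRuns (xs.dropWhile (· == x))
termination_by l => l.length
decreasing_by
  simpa using Nat.lt_succ_of_le (List.length_dropWhile_le (p := (· == x)) (l := xs))

-- 'out.extend([label] * (j - i)); label += 1' per run.
def pvLabels : List (List Int) → Int → List Int
  | [], _ => []
  | g :: gs, c => List.replicate g.length c ++ pvLabels gs (c + 1)

def relabel_clustering_alt (temporal_clustering : List Int) : List Int :=
  pvLabels (pvRuns temporal_clustering) 0

-- ===== PRECONDITION & SPEC =====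
-- A raises IndexError on the empty list (temporal_clustering[0]); Pre_ excludes exactly that.
def Pre_relabel_clustering (temporal_clustering : List Int) : Prop := temporal_clustering ≠ []
instance (temporal_clustering : List Int) : Decidable (Pre_relabel_clustering temporal_clustering) := by unfold Pre_relabel_clustering; infer_instance
def pvWitness_relabel_clustering : List Int := [1, 1, 2, 2, 1]

-- On the empty list A raises IndexError (temporal_clustering[0]); B returns [].
def Raises_relabel_clustering (temporal_clustering : List Int) : Prop := temporal_clustering = []
instance (temporal_clustering : List Int) : Decidable (Raises_relabel_clustering temporal_clustering) := by unfold Raises_relabel_clustering; infer_instance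
def pvRaiseWitness_relabel_clustering : List Int := []
def pvRaiseWitnessOut_relabel_clustering : List Int := []

def Spec_relabel_clustering (temporal_clustering : List Int) (out : List Int) : Prop := out = relabel_clustering_alt temporal_clustering
instance (temporal_clustering : List Int) (out : List Int) : Decidable (Spec_relabel_clustering temporal_clustering out) := by unfold Spec_relabel_clustering; infer_instance

-- ===== CLAIM (what is proved, stated in full; the proofs are below) =====
def Claim_equal_relabel_clustering : Prop := ∀ (temporal_clustering : List Int), Dom_relabel_clustering temporal_clustering → Pre_relabel_clustering temporal_clustering → Spec_relabel_clustering temporal_clustering (relabel_clustering temporal_clustering)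
def Claim_raises_relabel_clustering : Prop := (∀ (temporal_clustering : List Int), Dom_relabel_clustering temporal_clustering → Raises_relabel_clustering temporal_clustering → ¬ Pre_relabel_clustering temporal_clustering) ∧ (Dom_relabel_clustering (pvRaiseWitness_relabel_clustering) ∧ Raises_relabel_clustering (pvRaiseWitness_relabel_clustering) ∧ relabel_clustering_alt (pvRaiseWitness_relabel_clustering) = pvRaiseWitnessOut_relabel_clustering)

-- ===== LEMMAS AND PROOFS =====

-- A's loop, started with last = x, agrees with run-labelling of the remaining list:
-- elements still equal to x get label c, the rest is relabelled from c+1.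
theorem pvALoop_eq (l : List Int) (x c : Int) :
    pvALoop x c l = List.replicate (l.takeWhile (· == x)).length c ++ pvLabels (pvRuns (l.dropWhile (· == x))) (c + 1) := by
  induction l generalizing x c with
  | nil => simp [pvALoop, pvRuns, pvLabels]
  | cons y ys ih =>
    by_cases h : y = x
    · subst h
      simp [pvALoop, ih y c, List.replicate_succ]
    · simp [pvALoop, h, pvRuns, pvLabels, ih y (c + 1), List.replicate_succ]

theorem relabel_clustering_spec : Claim_equal_relabel_clustering := by
  intro tc _ hpre
  unfold Spec_relabel_clustering relabel_clustering relabel_clustering_alt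
  cases tc with
  | nil => exact absurd rfl hpre
  | cons h t =>
    simp [pvRuns, pvLabels, pvALoop, pvALoop_eq t h 0, List.replicate_succ]

@[simp] theorem relabel_clustering_raises : Claim_raises_relabel_clustering := by
  unfold Claim_raises_relabel_clustering
  exact ⟨fun tc _ hr => by simp [Pre_relabel_clustering, Raises_relabel_clustering] at *; exact hr, by
    refine ⟨by decide, by decide, ?_⟩
    simp [relabel_clustering_alt, pvRaiseWitness_relabel_clustering, pvRuns, pvLabels,
      pvRaiseWitnessOut_relabel_clustering]⟩
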